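-- pv_equiv track=rewrite | github.com/thealper2/codewars-solutions | 7-kyu/where_are_my_glasses.py | find_glasses
-- ===== SOURCE A (Python) =====
-- def find_glasses(lst):
--     for i in range(len(lst)):
--         word = lst[i]
--         prev = None
--         c = 0
--         for j in range(len(word)):
--             if word[j] == 'O':
--                 if prev is None:
--                     prev = j
--                 else:
--                     if c > 0:
--                         return i
--                     else:
--                         prev = j
--                         c = 0
--             elif word[j] == '-' and prev is not None:
--                 c += 1
--             else:
--                 prev = None
--                 c = 0
--     return -1
-- ===== SOURCE B (Python) =====
-- def find_glasses(lst):
--     for i, word in enumerate(lst):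
--         # collapse runs of dashes to a single dash, then a plain substring test
--         collapsed = ''.join(ch for ch, prev in zip(word, '\0' + word)
--                             if not (ch == '-' and prev == '-'))
--         if 'O-O' in collapsed:
--             return i
--     return -1
-- ===== Notes on version B (the rewrite author's own statement) =====
-- stated objective: simpler
-- what changed: A runs a per-character state machine (prev O-index plus dash counter) inside an index loop; B normalizes each word by collapsing runs of dashes to a single dash and then does a plain 'O-O' substring test, returning the index of the first matching word via enumerate.
import Mathlib
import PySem

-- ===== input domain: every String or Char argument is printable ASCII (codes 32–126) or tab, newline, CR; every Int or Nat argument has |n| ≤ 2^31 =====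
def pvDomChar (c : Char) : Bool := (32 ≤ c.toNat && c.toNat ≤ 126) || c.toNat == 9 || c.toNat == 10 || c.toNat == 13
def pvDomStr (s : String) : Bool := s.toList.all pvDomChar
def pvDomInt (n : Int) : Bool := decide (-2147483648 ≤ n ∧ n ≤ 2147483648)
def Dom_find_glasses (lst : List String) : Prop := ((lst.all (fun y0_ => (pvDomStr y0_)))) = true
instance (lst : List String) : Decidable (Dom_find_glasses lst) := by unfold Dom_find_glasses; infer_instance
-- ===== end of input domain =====

-- B replaces A's per-character state machine (prev 'O' index + dash counter) by collapsing
-- dash runs to a single dash and testing for the substring 'O-O' (objective: simpler).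

-- ===== PORT A =====
-- A's inner loop: remaining chars of word, index j, prev (index of last live 'O'), dash count c
def pvInnerA : List Char → Int → Option Int → Int → Bool
  | [], _, _, _ => false
  | ch :: t, j, prev, c =>
    if ch = 'O' then
      match prev with
      | none => pvInnerA t (j + 1) (some j) c
      | some _ => if c > 0 then true else pvInnerA t (j + 1) (some j) 0
    else if ch = '-' ∧ prev ≠ none then pvInnerA t (j + 1) prev (c + 1)
    else pvInnerA t (j + 1) none 0

-- A's outer loop: for i in range(len(lst)), return i on a match, else -1
def pvOuterA : List String → Int → Int
  | [], _ => -1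
  | w :: t, i => if pvInnerA w.toList 0 none 0 then i else pvOuterA t (i + 1)

def find_glasses (lst : List String) : Int := pvOuterA lst 0

-- ===== PORT B =====
-- B's loop body: collapsed = ''.join(ch for ch, prev in zip(word, '\0' + word)
--   if not (ch == '-' and prev == '-'));  'O-O' in collapsed   (strings as lists of chars)
def pvOuterB : List String → Int → Int
  | [], _ => -1
  | w :: t, i =>
    let collapsed :=
      ((w.toList.zip ('\u0000' :: w.toList)).filter
        (fun p => !(p.1 == '-' && p.2 == '-'))).map Prod.fst
    if PySem.Chars.isIn ['O', '-', 'O'] collapsed then i else pvOuterB t (i + 1)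

def find_glasses_alt (lst : List String) : Int := pvOuterB lst 0

-- ===== PRECONDITION & SPEC =====
def Spec_find_glasses (lst : List String) (out : Int) : Prop := out = find_glasses_alt lst
instance (lst : List String) (out : Int) : Decidable (Spec_find_glasses lst out) := by unfold Spec_find_glasses; infer_instance

-- ===== CLAIM (what is proved, stated in full; the proofs are below) =====
def Claim_equal_find_glasses : Prop := ∀ (lst : List String), Dom_find_glasses lst → Spec_find_glasses lst (find_glasses lst)

-- ===== LEMMAS AND PROOFS =====

-- proof-side view of B's collapse: pd = "previous char was a dash"
def pvCollapse : Bool → List Char → List Char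
  | _, [] => []
  | pd, c :: t => if c = '-' ∧ pd = true then pvCollapse true t else c :: pvCollapse (c == '-') t

-- proof-side view of A's inner machine: the three reachable abstract states
inductive pvGSt where
  | scan | afterO | afterDash
deriving DecidableEq, Repr

def pvStateF : pvGSt → List Char → Bool
  | _, [] => false
  | .scan, ch :: t => if ch = 'O' then pvStateF .afterO t else pvStateF .scan t
  | .afterO, ch :: t =>
      if ch = 'O' then pvStateF .afterO t
      else if ch = '-' then pvStateF .afterDash t
      else pvStateF .scan t
  | .afterDash, ch :: t =>
      if ch = 'O' then true
      else if ch = '-' then pvStateF .afterDash t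
      else pvStateF .scan t

-- B's zip/filter/map collapse equals pvCollapse
lemma pvCollapse_eq (cs : List Char) : ∀ (p : Char),
    ((cs.zip (p :: cs)).filter (fun q => !(q.1 == '-' && q.2 == '-'))).map Prod.fst
      = pvCollapse (p == '-') cs := by
  induction cs with
  | nil => intro p; rfl
  | cons c t ih =>
    intro p
    rw [List.zip_cons_cons, List.filter_cons]
    by_cases hc : c = '-'
    · subst hc
      by_cases hp : p = '-'
      · subst hp
        rw [show (!((('-':Char), ('-':Char)).1 == '-' && (('-':Char), ('-':Char)).2 == '-')) = false from rfl]
        rw [if_neg (by simp)]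
        rw [ih '-']
        simp [pvCollapse]
      · rw [if_pos (by simp [hp])]
        rw [List.map_cons, ih '-']
        simp [pvCollapse, hp]
    · rw [if_pos (by simp [hc])]
      rw [List.map_cons, ih c]
      simp [pvCollapse, hc]

-- a non-'O' head never matters for containing 'O-O'
lemma pvInfix_cons (x : Char) (l : List Char) (hx : x ≠ 'O') :
    (['O', '-', 'O'] <:+: x :: l) ↔ (['O', '-', 'O'] <:+: l) := by
  rw [List.infix_cons_iff]
  constructor
  · rintro (h | h)
    · rw [List.cons_prefix_cons] at h; exact absurd h.1.symm hx
    · exact h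
  · exact Or.inr

-- the machine states against 'O-O' containment in the collapsed remainder
lemma pvMain (cs : List Char) :
    (∀ pd, pvStateF .scan cs = true ↔ ['O', '-', 'O'] <:+: pvCollapse pd cs) ∧
    (pvStateF .afterO cs = true ↔ ['O', '-', 'O'] <:+: 'O' :: pvCollapse false cs) ∧
    (pvStateF .afterDash cs = true ↔ ['O', '-', 'O'] <:+: 'O' :: '-' :: pvCollapse true cs) := by
  induction cs with
  | nil =>
    refine ⟨fun pd => ?_, ?_, ?_⟩ <;> simp [pvStateF, pvCollapse] <;> decide
  | cons c t ih =>
    obtain ⟨ihS, ihO, ihD⟩ := ih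
    by_cases hO : c = 'O'
    · subst hO
      refine ⟨fun pd => ?_, ?_, ?_⟩
      · -- scan, 'O'
        have h1 : pvStateF .scan ('O' :: t) = pvStateF .afterO t := by simp [pvStateF]
        have h2 : pvCollapse pd ('O' :: t) = 'O' :: pvCollapse false t := by
          simp [pvCollapse]
        rw [h1, h2]; exact ihO
      · -- afterO, 'O'
        have h1 : pvStateF .afterO ('O' :: t) = pvStateF .afterO t := by simp [pvStateF]
        have h2 : pvCollapse false ('O' :: t) = 'O' :: pvCollapse false t := by
          simp [pvCollapse]
        rw [h1, h2, ihO]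
        have hpre : ¬ (['O', '-', 'O'] <+: 'O' :: 'O' :: pvCollapse false t) := by
          rw [List.cons_prefix_cons, List.cons_prefix_cons]
          rintro ⟨-, h, -⟩; exact absurd h.symm (by decide)
        constructor
        · exact fun h => List.infix_cons h
        · intro h
          rcases List.infix_cons_iff.mp h with h | h
          · exact absurd h hpre
          · exact h
      · -- afterDash, 'O'
        have h1 : pvStateF .afterDash ('O' :: t) = true := by simp [pvStateF]
        have h2 : pvCollapse true ('O' :: t) = 'O' :: pvCollapse false t := by
          simp [pvCollapse]
        rw [h1, h2]
        simp only [true_iff]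
        exact ⟨[], pvCollapse false t, rfl⟩
    · by_cases hD : c = '-'
      · subst hD
        refine ⟨fun pd => ?_, ?_, ?_⟩
        · -- scan, '-'
          have h1 : pvStateF .scan ('-' :: t) = pvStateF .scan t := by simp [pvStateF]
          rw [h1]
          cases pd with
          | true =>
            have h2 : pvCollapse true ('-' :: t) = pvCollapse true t := by simp [pvCollapse]
            rw [h2]; exact ihS true
          | false =>
            have h2 : pvCollapse false ('-' :: t) = '-' :: pvCollapse true t := by
              simp [pvCollapse]
            rw [h2, pvInfix_cons '-' _ (by decide)]; exact ihS true
        · -- afterO, '-'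
          have h1 : pvStateF .afterO ('-' :: t) = pvStateF .afterDash t := by simp [pvStateF]
          have h2 : pvCollapse false ('-' :: t) = '-' :: pvCollapse true t := by
            simp [pvCollapse]
          rw [h1, h2]; exact ihD
        · -- afterDash, '-'
          have h1 : pvStateF .afterDash ('-' :: t) = pvStateF .afterDash t := by simp [pvStateF]
          have h2 : pvCollapse true ('-' :: t) = pvCollapse true t := by simp [pvCollapse]
          rw [h1, h2]; exact ihD
      · refine ⟨fun pd => ?_, ?_, ?_⟩
        · -- scan, other
          have h1 : pvStateF .scan (c :: t) = pvStateF .scan t := by simp [pvStateF, hO]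
          have hb : (c == '-') = false := by simp [hD]
          have h2 : pvCollapse pd (c :: t) = c :: pvCollapse false t := by
            simp [pvCollapse, hD, hb]
          rw [h1, h2, pvInfix_cons c _ hO]; exact ihS false
        · -- afterO, other
          have h1 : pvStateF .afterO (c :: t) = pvStateF .scan t := by simp [pvStateF, hO, hD]
          have hb : (c == '-') = false := by simp [hD]
          have h2 : pvCollapse false (c :: t) = c :: pvCollapse false t := by
            simp [pvCollapse, hD, hb]
          rw [h1, h2]
          rw [List.infix_cons_iff]
          have hpre : ¬ (['O', '-', 'O'] <+: 'O' :: c :: pvCollapse false t) := by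
            rw [List.cons_prefix_cons, List.cons_prefix_cons]
            rintro ⟨-, h, -⟩; exact absurd h.symm hD
          rw [pvInfix_cons c _ hO]
          have := ihS false
          tauto
        · -- afterDash, other
          have h1 : pvStateF .afterDash (c :: t) = pvStateF .scan t := by simp [pvStateF, hO, hD]
          have hb : (c == '-') = false := by simp [hD]
          have h2 : pvCollapse true (c :: t) = c :: pvCollapse false t := by
            simp [pvCollapse, hD, hb]
          rw [h1, h2]
          rw [List.infix_cons_iff]
          have hpre : ¬ (['O', '-', 'O'] <+: 'O' :: '-' :: c :: pvCollapse false t) := by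
            rw [List.cons_prefix_cons, List.cons_prefix_cons, List.cons_prefix_cons]
            rintro ⟨-, -, h, -⟩; exact absurd h.symm hO
          rw [pvInfix_cons '-' _ (by decide), pvInfix_cons c _ hO]
          have := ihS false
          tauto

-- A's inner loop computes pvStateF on the reachable states
lemma pvInnerA_state (cs : List Char) : ∀ (j : Int),
    (pvInnerA cs j none 0 = pvStateF .scan cs) ∧
    (∀ k, pvInnerA cs j (some k) 0 = pvStateF .afterO cs) ∧
    (∀ k c, 0 < c → pvInnerA cs j (some k) c = pvStateF .afterDash cs) := by
  induction cs with
  | nil => intro j; exact ⟨rfl, fun _ => rfl, fun _ _ _ => rfl⟩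
  | cons ch t ih =>
    intro j
    obtain ⟨ihS, ihO, ihD⟩ := ih (j + 1)
    by_cases hO : ch = 'O'
    · subst hO
      refine ⟨?_, fun k => ?_, fun k c hc => ?_⟩
      · simpa [pvInnerA, pvStateF] using ihO j
      · simpa [pvInnerA, pvStateF] using ihO j
      · simp [pvInnerA, pvStateF, hc]
    · by_cases hD : ch = '-'
      · subst hD
        refine ⟨?_, fun k => ?_, fun k c hc => ?_⟩
        · simpa [pvInnerA, pvStateF] using ihS
        · simpa [pvInnerA, pvStateF] using ihD k 1 (by omega)
        · simpa [pvInnerA, pvStateF] using ihD k (c + 1) (by omega)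
      · refine ⟨?_, fun k => ?_, fun k c hc => ?_⟩ <;>
          simpa [pvInnerA, pvStateF, hO, hD] using ihS

lemma pvOuter_eq (lst : List String) : ∀ (i : Int), pvOuterA lst i = pvOuterB lst i := by
  induction lst with
  | nil => intro i; rfl
  | cons w t ih =>
    intro i
    simp only [pvOuterA, pvOuterB]
    rw [pvCollapse_eq w.toList '\u0000']
    rw [show (('\u0000' : Char) == '-') = false from rfl]
    have h : pvInnerA w.toList 0 none 0 = PySem.Chars.isIn ['O', '-', 'O'] (pvCollapse false w.toList) := by
      rw [(pvInnerA_state w.toList 0).1]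
      rw [Bool.eq_iff_iff, PySem.Chars.isIn_iff_infix]
      exact (pvMain w.toList).1 false
    rw [h, ih (i + 1)]

-- ===== VERDICT (by name: the statement is the Claim_ definition above) =====
theorem find_glasses_spec : Claim_equal_find_glasses := by
  intro lst _
  unfold Spec_find_glasses find_glasses find_glasses_alt
  exact pvOuter_eq lst 0
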